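-- pv_equiv track=rewrite | github.com/vaniakosmos/cowsay | app/cow.py | soft_wrap_text
-- ===== SOURCE A (Python) =====
-- MAX_WIDTH = 40
--
-- def soft_wrap_text(text: str, width=MAX_WIDTH):
--     words = text.split()[::-1]
--     lines = []
--     line = ''
--     while words:
--         word = words.pop()
--         if len(word) > width:
--             head = word[:width]
--             tail = word[width:]
--             if tail:
--                 words.append(tail)
--             words.append(head)
--             continue
--
--         if len(line + word) <= width:
--             line += ' ' + word
--         else:
--             words.append(word)
--             lines.append(line.strip())
--             line = ''
--     if line:
--         lines.append(line.strip())
--     text = '\n'.join(lines)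
--     return text
-- ===== SOURCE B (Python) =====
-- MAX_WIDTH = 40
--
--
-- def soft_wrap_text(text: str, width=MAX_WIDTH):
--     # Pass 1: flatten the words into tokens of length <= width.
--     tokens = []
--     for word in text.split():
--         while len(word) > width:
--             tokens.append(word[:width])
--             word = word[width:]
--         tokens.append(word)
--     # Pass 2: forward greedy fill.
--     lines = []
--     current = ''
--     for tok in tokens:
--         if not current:
--             current = tok
--         elif len(current) + 1 + len(tok) <= width:
--             current += ' ' + tok
--         else:
--             lines.append(current)
--             current = tok
--     if current:
--         lines.append(current)
--     return '\n'.join(lines)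
-- ===== Notes on version B (the rewrite author's own statement) =====
-- stated objective: simpler
-- what changed: Replaces A's reversed-stack while-loop that re-pushes tails and unplaced words with two forward-only passes: first chunk every word into tokens of length <= width, then a single greedy pass that joins tokens into lines.
import Mathlib
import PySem

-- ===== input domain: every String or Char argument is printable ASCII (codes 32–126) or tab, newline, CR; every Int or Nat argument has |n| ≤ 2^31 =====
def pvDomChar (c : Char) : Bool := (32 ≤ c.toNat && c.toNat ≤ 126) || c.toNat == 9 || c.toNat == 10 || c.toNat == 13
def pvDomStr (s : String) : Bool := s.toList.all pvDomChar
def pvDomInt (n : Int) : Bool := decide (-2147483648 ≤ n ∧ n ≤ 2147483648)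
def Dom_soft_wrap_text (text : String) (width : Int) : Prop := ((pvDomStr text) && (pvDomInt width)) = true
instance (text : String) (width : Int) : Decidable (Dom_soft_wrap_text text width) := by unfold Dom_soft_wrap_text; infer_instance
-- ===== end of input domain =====

-- B replaces A's reversed-stack loop (which re-pushes tails and unplaced words) by two forward
-- passes — chunk every word into tokens of length <= width, then one greedy fill; objective: simpler.


-- ===== PORT A =====
-- A's while-loop.  The Python list `words = text.split()[::-1]` popped/pushed at its END is
-- represented with the stack top at the HEAD of a Lean list (the same pop order: the words of
-- text.split() front to back); `words.append(tail); words.append(head)` is head :: tail :: ws.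
-- Fuel makes the loop total: Python's loop diverges when width ≤ 0 and a word exists (excluded
-- by Pre_), and swtLoopA_eq below shows the chosen fuel is never exhausted under Pre_.
-- Python's trailing `if line: lines.append(line.strip())` is the empty-stack case of the match.
def swtLoopA (width : Int) : Nat → List (List Char) → List (List Char) → List Char → List (List Char)
  | _, [], lines, line => if line ≠ [] then lines ++ [PySem.Chars.strip line] else lines
  | 0, _ :: _, lines, line => if line ≠ [] then lines ++ [PySem.Chars.strip line] else lines
  | f + 1, word :: words, lines, line =>
    if (word.length : Int) > width then
      let head := PySem.Chars.slice word none (some width)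
      let tail := PySem.Chars.slice word (some width) none
      let words' := if tail ≠ [] then tail :: words else words
      swtLoopA width f (head :: words') lines line
    else if ((line ++ word).length : Int) ≤ width then
      swtLoopA width f words lines (line ++ ' ' :: word)
    else
      swtLoopA width f (word :: words) (lines ++ [PySem.Chars.strip line]) []

def soft_wrap_text (text : String) (width : Int) : String :=
  let words := PySem.Chars.split₀ text.toList
  let fuel := 5 * (words.map List.length).sum + 1
  String.ofList (PySem.Chars.join ['\n'] (swtLoopA width fuel words [] []))

-- ===== PORT B =====
-- B's inner `while len(word) > width:` loop; fuel word.length suffices because each pass drops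
-- width ≥ 1 characters (width ≤ 0, where Python's while diverges, is outside Pre_).
def swtChunk (width : Int) : Nat → List Char → List (List Char)
  | 0, word => [word]
  | f + 1, word =>
    if (word.length : Int) > width then
      PySem.Chars.slice word none (some width) ::
        swtChunk width f (PySem.Chars.slice word (some width) none)
    else [word]

-- B's first pass: the flat token list (every token of length ≤ width)
def swtTokens (width : Int) (words : List (List Char)) : List (List Char) :=
  words.foldl (fun acc w => acc ++ swtChunk width w.length w) []

-- B's second pass: forward greedy fill, state (lines, current)
def swtGreedy (width : Int) : List (List Char) → List (List Char) → List Char → List (List Char) × List Char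
  | [], lines, cur => (lines, cur)
  | t :: ts, lines, cur =>
    if cur = [] then swtGreedy width ts lines t
    else if (cur.length : Int) + 1 + t.length ≤ width then swtGreedy width ts lines (cur ++ ' ' :: t)
    else swtGreedy width ts (lines ++ [cur]) t

-- B's trailing `if current: lines.append(current)`
def swtFinish (p : List (List Char) × List Char) : List (List Char) :=
  if p.2 ≠ [] then p.1 ++ [p.2] else p.1

def soft_wrap_text_alt (text : String) (width : Int) : String :=
  String.ofList (PySem.Chars.join ['\n']
    (swtFinish (swtGreedy width (swtTokens width (PySem.Chars.split₀ text.toList)) [] [])))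

-- ===== PRECONDITION & SPEC =====
-- Pre_ excludes exactly the inputs on which Python A never returns: with width ≤ 0 and at
-- least one word, A's while-loop re-pushes the word (or empty chunks) forever and diverges.
def Pre_soft_wrap_text (text : String) (width : Int) : Prop :=
  1 ≤ width ∨ PySem.Chars.split₀ text.toList = []
instance (text : String) (width : Int) : Decidable (Pre_soft_wrap_text text width) := by
  unfold Pre_soft_wrap_text; infer_instance
def pvWitness_soft_wrap_text : String × Int := ("hello wrapped world", 7)

def Spec_soft_wrap_text (text : String) (width : Int) (out : String) : Prop := out = soft_wrap_text_alt text width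
instance (text : String) (width : Int) (out : String) : Decidable (Spec_soft_wrap_text text width out) := by unfold Spec_soft_wrap_text; infer_instance

-- ===== CLAIM (what is proved, stated in full; the proofs are below) =====
def Claim_equal_soft_wrap_text : Prop := ∀ (text : String) (width : Int), Dom_soft_wrap_text text width → Pre_soft_wrap_text text width → Spec_soft_wrap_text text width (soft_wrap_text text width)

-- ===== LEMMAS AND PROOFS =====

-- a word produced by text.split(): nonempty and free of whitespace characters
def swtGoodW (w : List Char) : Prop := w ≠ [] ∧ ∀ c ∈ w, PySem.Chars.isspace c = false

-- the boundary characters of B's current line are not whitespace (so A's strip is the identity)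
def swtBCur (cur : List Char) : Prop :=
  ∀ c, (cur.head? = some c ∨ cur.getLast? = some c) → PySem.Chars.isspace c = false

-- A's `line` as a function of B's `current`: the leading ' ' that A strips at flush time
def swtLineOf (cur : List Char) : List Char := if cur = [] then [] else ' ' :: cur

lemma swtGo_good (s : List Char) : ∀ (cur : List Char) (acc : List (List Char)),
    (∀ c ∈ cur, PySem.Chars.isspace c = false) →
    (∀ w ∈ acc, swtGoodW w) →
    ∀ w ∈ PySem.Chars.split₀.go s cur acc, swtGoodW w := by
  induction s with
  | nil =>
    intro cur acc hc ha w hw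
    by_cases he : cur.isEmpty
    · simp only [PySem.Chars.split₀.go, he, if_pos] at hw
      exact ha w (by simpa using hw)
    · simp only [PySem.Chars.split₀.go, he] at hw
      rcases (by simpa using hw : w ∈ acc ∨ w = cur.reverse) with h | h
      · exact ha w h
      · subst h
        exact ⟨by simpa using he, fun c hc' => hc c (by simpa using hc')⟩
  | cons a rest ih =>
    intro cur acc hc ha w hw
    by_cases hsp : PySem.Chars.isspace a = true
    · by_cases he : cur.isEmpty
      · simp only [PySem.Chars.split₀.go, hsp, he, if_pos] at hw
        exact ih [] acc (by simp) ha w hw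
      · simp only [PySem.Chars.split₀.go, hsp, he] at hw
        refine ih [] (cur.reverse :: acc) (by simp) ?_ w hw
        intro w' hw'
        rcases List.mem_cons.mp hw' with h | h
        · subst h
          exact ⟨by simpa using he, fun c' hc' => hc c' (by simpa using hc')⟩
        · exact ha w' h
    · simp only [PySem.Chars.split₀.go, hsp] at hw
      refine ih (a :: cur) acc ?_ ha w hw
      intro c' hc'
      rcases List.mem_cons.mp hc' with h | h
      · subst h; simpa using hsp
      · exact hc c' h

lemma swtSplit₀_good (s : List Char) : ∀ w ∈ PySem.Chars.split₀ s, swtGoodW w :=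
  fun w hw => swtGo_good s [] [] (by simp) (by simp) w hw

lemma swtBCur_of_good {t : List Char} (h : swtGoodW t) : swtBCur t := by
  intro c hc
  rcases hc with hc | hc
  · exact h.2 c (List.mem_of_mem_head? hc)
  · exact h.2 c (List.mem_of_getLast? hc)

lemma swtBCur_extend {cur t : List Char} (hb : swtBCur cur) (ht : swtGoodW t)
    (hne : cur ≠ []) : swtBCur (cur ++ ' ' :: t) := by
  intro c hc
  rcases hc with hc | hc
  · rw [List.head?_append_of_ne_nil _ hne] at hc
    exact hb c (Or.inl hc)
  · rw [List.getLast?_append_of_ne_nil _ (by simp)] at hc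
    rw [List.getLast?_cons, ← List.head?_reverse] at hc
    rcases ht with ⟨hne', hsp⟩
    cases hr : t.reverse with
    | nil => simp [List.reverse_eq_nil_iff] at hr; exact absurd hr hne'
    | cons d u =>
      rw [hr] at hc
      simp at hc
      subst hc
      exact hsp d (by have := List.mem_reverse.mp (hr ▸ List.mem_cons_self (l := u)); exact this)

lemma swtStrip_space_cons {cur : List Char} (hb : swtBCur cur) (hne : cur ≠ []) :
    PySem.Chars.strip (' ' :: cur) = cur := by
  unfold PySem.Chars.strip PySem.Chars.lstrip PySem.Chars.rstrip
  cases cur with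
  | nil => exact absurd rfl hne
  | cons c rest =>
    have hc : PySem.Chars.isspace c = false := hb c (Or.inl rfl)
    rw [List.dropWhile_cons_of_pos (by decide)]
    rw [List.dropWhile_cons_of_neg (by simp [hc])]
    cases hr : (c :: rest).reverse with
    | nil => simp at hr
    | cons d u =>
      have hd : (c :: rest).getLast? = some d := by
        rw [← List.head?_reverse, hr]; rfl
      rw [List.dropWhile_cons_of_neg (by simp [hb d (Or.inr hd)])]
      rw [← hr, List.reverse_reverse]

lemma swtSlice_head (w : List Char) {width : Int} (hw : 1 ≤ width) :
    PySem.Chars.slice w none (some width) = w.take width.toNat := by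
  rw [PySem.Chars.slice_eq_listSlice, PySem.List.slice_to _ (by omega)]

lemma swtSlice_tail (w : List Char) {width : Int} (hw : 1 ≤ width) :
    PySem.Chars.slice w (some width) none = w.drop width.toNat := by
  rw [PySem.Chars.slice_eq_listSlice, PySem.List.slice_from _ (by omega)]

lemma swtChunk_short {width : Int} (f : Nat) {w : List Char}
    (h : ¬ (w.length : Int) > width) : swtChunk width f w = [w] := by
  cases f <;> simp [swtChunk, h]

lemma swtChunk_irrel {width : Int} (hw : 1 ≤ width) :
    ∀ (f : Nat) (w : List Char) (g : Nat), w.length ≤ f → w.length ≤ g →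
      swtChunk width f w = swtChunk width g w := by
  intro f
  induction f with
  | zero =>
    intro w g hf _
    have : w = [] := List.eq_nil_of_length_eq_zero (Nat.le_zero.mp hf)
    subst this
    rw [swtChunk_short g (by simp; omega)]
    rfl
  | succ f ih =>
    intro w g hf hg
    by_cases hl : (w.length : Int) > width
    · have hg1 : 1 ≤ g := by
        have : 1 ≤ w.length := by omega
        omega
      obtain ⟨g', rfl⟩ : ∃ g', g = g' + 1 := ⟨g - 1, by omega⟩
      simp only [swtChunk, hl, if_pos]
      congr 1
      have hlen : (PySem.Chars.slice w (some width) none).length = w.length - width.toNat := by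
        rw [swtSlice_tail w hw, List.length_drop]
      refine ih _ g' ?_ ?_ <;> rw [hlen] <;> omega
    · rw [swtChunk_short (f+1) hl, swtChunk_short g hl]

lemma swtChunk_long {width : Int} {w : List Char} (hw : 1 ≤ width)
    (hl : (w.length : Int) > width) :
    swtChunk width w.length w = PySem.Chars.slice w none (some width) ::
      swtChunk width (PySem.Chars.slice w (some width) none).length
        (PySem.Chars.slice w (some width) none) := by
  obtain ⟨n, hn⟩ : ∃ n, w.length = n + 1 := ⟨w.length - 1, by omega⟩
  rw [hn]
  simp only [swtChunk, hl, if_pos]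
  congr 1
  have hlen : (PySem.Chars.slice w (some width) none).length = w.length - width.toNat := by
    rw [swtSlice_tail w hw, List.length_drop]
  exact swtChunk_irrel hw n _ _ (by rw [hlen]; omega) (le_refl _)

lemma swtLen_le_sum {ws : List (List Char)} (h : ∀ w ∈ ws, swtGoodW w) :
    ws.length ≤ (ws.map List.length).sum := by
  induction ws with
  | nil => simp
  | cons w rest ih =>
    have h1 : 1 ≤ w.length := by
      have := (h w (by simp)).1
      cases w with
      | nil => exact absurd rfl this
      | cons _ _ => simp
    have := ih (fun w hw => h w (by simp [hw]))
    simp only [List.map_cons, List.sum_cons, List.length_cons]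
    omega

-- MAIN LEMMA
lemma swtLoopA_eq {width : Int} (hw : 1 ≤ width) :
    ∀ (fuel : Nat) (ws lines : List (List Char)) (cur : List Char),
    (∀ w ∈ ws, swtGoodW w) → swtBCur cur →
    5 * (ws.map List.length).sum + cur.length < fuel + ws.length →
    swtLoopA width fuel ws lines (swtLineOf cur) =
      swtFinish (swtGreedy width (ws.flatMap fun w => swtChunk width w.length w) lines cur) := by
  intro fuel
  induction fuel with
  | zero =>
    intro ws lines cur hg hb hm
    cases ws with
    | nil =>
      by_cases hc : cur = []
      · subst hc; simp [swtLoopA, swtLineOf, swtGreedy, swtFinish]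
      · simp only [swtLineOf, if_neg hc]
        simp only [swtLoopA, List.flatMap_nil, swtGreedy, swtFinish]
        rw [swtStrip_space_cons hb hc]
        simp [hc]
    | cons w rest =>
      exfalso
      have := swtLen_le_sum hg
      omega
  | succ f ih =>
    intro ws lines cur hg hb hm
    cases ws with
    | nil =>
      by_cases hc : cur = []
      · subst hc; simp [swtLoopA, swtLineOf, swtGreedy, swtFinish]
      · simp only [swtLineOf, if_neg hc]
        simp only [swtLoopA, List.flatMap_nil, swtGreedy, swtFinish]
        rw [swtStrip_space_cons hb hc]
        simp [hc]
    | cons w rest =>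
      have hgw : swtGoodW w := hg w (by simp)
      have hgrest : ∀ w' ∈ rest, swtGoodW w' := fun w' hw' => hg w' (by simp [hw'])
      have hw1 : 1 ≤ w.length := by
        cases w with
        | nil => exact absurd rfl hgw.1
        | cons _ _ => simp
      by_cases hl : (w.length : Int) > width
      · -- long word: A chunks lazily, B pre-chunks; the token streams coincide
        have hwn : 1 ≤ width.toNat := by omega
        have hwlt : width.toNat < w.length := by omega
        have hhead : PySem.Chars.slice w none (some width) = w.take width.toNat := swtSlice_head w hw
        have htail : PySem.Chars.slice w (some width) none = w.drop width.toNat := swtSlice_tail w hw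
        have htne : PySem.Chars.slice w (some width) none ≠ [] := by
          rw [htail]
          apply List.ne_nil_of_length_pos
          rw [List.length_drop]
          omega
        have step : swtLoopA width (f+1) (w :: rest) lines (swtLineOf cur) =
            swtLoopA width f (PySem.Chars.slice w none (some width) ::
              PySem.Chars.slice w (some width) none :: rest) lines (swtLineOf cur) := by
          simp only [swtLoopA, hl, if_pos]
          rw [if_pos htne]
        rw [step]
        have hghead : swtGoodW (w.take width.toNat) := by
          constructor
          · apply List.ne_nil_of_length_pos
            rw [List.length_take]
            omega
          · intro c hc; exact hgw.2 c (List.mem_of_mem_take hc)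
        have hgtail : swtGoodW (w.drop width.toNat) := by
          constructor
          · apply List.ne_nil_of_length_pos
            rw [List.length_drop]
            omega
          · intro c hc; exact hgw.2 c (List.mem_of_mem_drop hc)
        have hrec := ih (w.take width.toNat :: w.drop width.toNat :: rest) lines cur
          (by
            intro w' hw'
            rcases List.mem_cons.mp hw' with h | h
            · subst h; exact hghead
            · rcases List.mem_cons.mp h with h | h
              · subst h; exact hgtail
              · exact hgrest w' h)
          hb
          (by
            simp only [List.map_cons, List.sum_cons, List.length_cons,
              List.length_take, List.length_drop] at hm ⊢
            omega)
        rw [hhead, htail, hrec]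
        congr 2
        have e2 : ((w :: rest).flatMap fun w' => swtChunk width w'.length w') =
            swtChunk width w.length w ++ (rest.flatMap fun w' => swtChunk width w'.length w') := by
          simp [List.flatMap_cons]
        rw [e2, swtChunk_long hw hl, hhead, htail]
        have hhead_short : swtChunk width (min width.toNat w.length) (w.take width.toNat) =
            [w.take width.toNat] := by
          apply swtChunk_short
          simp only [List.length_take]
          push_cast
          omega
        simp only [List.flatMap_cons, List.length_take, List.length_drop, hhead_short]
        simp
      · -- short word: one token
        by_cases hc : cur = []
        · subst hc
          have hle : (w.length : Int) ≤ width := by omega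
          have step : swtLoopA width (f+1) (w :: rest) lines (swtLineOf []) =
              swtLoopA width f rest lines (swtLineOf w) := by
            simp only [swtLoopA, hl, ite_false, swtLineOf, List.nil_append, ite_true]
            rw [if_pos hle, if_neg hgw.1]
          rw [step]
          rw [ih rest lines w hgrest (swtBCur_of_good hgw)
            (by
              simp only [List.map_cons, List.sum_cons, List.length_cons] at hm ⊢
              omega)]
          congr 1
          rw [List.flatMap_cons, swtChunk_short _ hl]
          simp [swtGreedy]
        · -- cur ≠ []
          have hline : swtLineOf cur = ' ' :: cur := by simp [swtLineOf, hc]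
          by_cases hfit : (cur.length : Int) + 1 + w.length ≤ width
          · have cond : ((swtLineOf cur ++ w).length : Int) ≤ width := by
              rw [hline]; simp; omega
            have step : swtLoopA width (f+1) (w :: rest) lines (swtLineOf cur) =
                swtLoopA width f rest lines (swtLineOf (cur ++ ' ' :: w)) := by
              simp only [swtLoopA, hl, ite_false]
              rw [if_pos cond, hline]
              have : (' ' :: cur) ++ ' ' :: w = swtLineOf (cur ++ ' ' :: w) := by
                simp [swtLineOf]
              rw [← this]
            rw [step]
            rw [ih rest lines (cur ++ ' ' :: w) hgrest (swtBCur_extend hb hgw hc)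
              (by
                simp only [List.map_cons, List.sum_cons, List.length_cons,
                  List.length_append] at hm ⊢
                omega)]
            congr 1
            rw [List.flatMap_cons, swtChunk_short _ hl]
            simp only [List.cons_append, List.nil_append, swtGreedy]
            rw [if_neg hc, if_pos hfit]
          · have cond : ¬ ((swtLineOf cur ++ w).length : Int) ≤ width := by
              rw [hline]; simp; omega
            have step : swtLoopA width (f+1) (w :: rest) lines (swtLineOf cur) =
                swtLoopA width f (w :: rest) (lines ++ [cur]) (swtLineOf []) := by
              simp only [swtLoopA, hl, ite_false]
              rw [if_neg cond, hline, swtStrip_space_cons hb hc]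
              rfl
            rw [step]
            rw [ih (w :: rest) (lines ++ [cur]) [] hg (by intro c hc'; simp at hc')
              (by
                have hcl : 1 ≤ cur.length := by
                  cases cur with
                  | nil => exact absurd rfl hc
                  | cons _ _ => simp
                simp only [List.length_nil]
                omega)]
            congr 1
            rw [List.flatMap_cons, swtChunk_short _ hl]
            simp only [List.cons_append, List.nil_append, swtGreedy]
            rw [if_neg hc, if_neg hfit]
            simp

-- ===== VERDICT (by name: the statement is the Claim_ definition above) =====
theorem soft_wrap_text_spec : Claim_equal_soft_wrap_text := by
  intro text width _ hpre
  show soft_wrap_text text width = soft_wrap_text_alt text width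
  simp only [soft_wrap_text, soft_wrap_text_alt]
  rcases hpre with hw | hnil
  · congr 1
    have hb : swtBCur [] := by intro c hc; simp at hc
    have := swtLoopA_eq hw (5 * ((PySem.Chars.split₀ text.toList).map List.length).sum + 1)
      (PySem.Chars.split₀ text.toList) [] [] (swtSplit₀_good _) hb
      (by simp only [List.length_nil, Nat.add_zero]; omega)
    simp only [swtLineOf, ite_true] at this
    rw [this]
    congr 1
    unfold swtTokens
    rw [PySem.List.foldl_append_eq_flatMap]
    rfl
  · rw [hnil]
    rfl
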